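-- pv_equiv track=rewrite | github.com/ImAni07/DSAlgo_Archive | 01. Striver's_A2Z_DSA_Sheet/09. Sliding Window, Two-Pointers & Hashing/Highest_Lowest_Frequency.py | getFrequencies
-- ===== SOURCE A (Python) =====
-- def getFrequencies (n, v):
--
--     # Handle the Edge Case --> When the arrayv is null
--     if not v:
--         return [0, 0]
--
--     else:
--
--         # Create a hashmap to store the frequency of each element in the array
--         freqMap = {}
--
--         # Create a resultant list
--         result = []
--
--         # Iterate through the array and update the corresponding frequencies
--         for i in range(n):
--
--             # If it is already present, increment the frequency by 1
--             if v[i] in freqMap: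
--                 freqMap[v[i]] += 1
--
--             # If not present, then insert it and initialize the frequency to 1
--             else:
--                 freqMap[v[i]] = 1
--
--         # Determine the Highest as well as the Lowest Frequency Elements
--
--         # For Highest Frequency
--         maxFreq = max(freqMap.values())
--         maxFreqElements = [key for key, value in freqMap.items() if value == maxFreq]
--
--         # Choose the smallest value
--         if len(maxFreqElements) > 1:
--             highestCount = min(maxFreqElements)
--         else:
--             highestCount = maxFreqElements[0]
--
--         # For Lowest Frequency
--         minFreq = min(freqMap.values())
--         minFreqElements = [key for key, value in freqMap.items() if value == minFreq]
--
--         # Choose the smallest value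
--         if len(minFreqElements) > 1:
--             lowestCount = min(minFreqElements)
--         else:
--             lowestCount = minFreqElements[0]
--
--         # Append the required elements in the resultant list
--         result.append(highestCount)
--         result.append(lowestCount)
--
--         # Return the result
--         return result
-- ===== SOURCE B (Python) =====
-- def getFrequencies(n, v):
--     if not v:
--         return [0, 0]
--     freq = {}
--     for i in range(n):
--         x = v[i]
--         freq[x] = freq.get(x, 0) + 1
--     items = list(freq.items())
--     hk, hf = items[0]
--     lk, lf = hk, hf
--     for k, c in items[1:]:
--         if c > hf or (c == hf and k < hk):
--             hf, hk = c, k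
--         if c < lf or (c == lf and k < lk):
--             lf, lk = c, k
--     return [hk, lk]
-- ===== Notes on version B (the rewrite author's own statement) =====
-- stated objective: alternative
-- what changed: B counts with an unconditional freq[x] = freq.get(x,0)+1 update and then selects both answers in a single winner-tracking pass over freq.items() (best frequency plus smallest key for highest and lowest at once), instead of A's four separate dict scans (max over values, filter, min over values, filter) followed by min/first selection.
import Mathlib
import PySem

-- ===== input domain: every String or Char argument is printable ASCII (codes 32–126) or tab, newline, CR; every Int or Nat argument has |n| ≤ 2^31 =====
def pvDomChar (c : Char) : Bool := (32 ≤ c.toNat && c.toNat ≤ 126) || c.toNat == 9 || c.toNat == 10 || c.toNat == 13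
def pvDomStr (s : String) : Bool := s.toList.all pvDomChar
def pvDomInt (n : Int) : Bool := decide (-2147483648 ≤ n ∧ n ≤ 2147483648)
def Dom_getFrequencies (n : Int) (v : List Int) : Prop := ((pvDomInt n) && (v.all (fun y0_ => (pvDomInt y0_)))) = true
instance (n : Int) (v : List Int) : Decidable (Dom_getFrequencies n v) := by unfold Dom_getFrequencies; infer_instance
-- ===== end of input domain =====

-- B replaces A's four dict scans (max, filter, min, filter, plus min/index selection)
-- by a single winner-tracking pass over freq.items(); equivalence is about the return value only.

-- ===== PORT A =====
def getFrequencies (n : Int) (v : List Int) : List Int :=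
  if v = [] then [0, 0]
  else
    let freqMap := (PySem.List.pyRange 0 n).foldl
      (fun d i =>
        let x := PySem.List.pyGetD v i 0      -- v[i]; in range under Pre_
        if d.contains x then d.insert x (d.getD x 0 + 1)   -- freqMap[v[i]] += 1
        else d.insert x 1) (PySem.Dict.empty : PySem.Dict Int Int)
    let maxFreq := (PySem.List.max? freqMap.values (fun x => x)).getD 0   -- some under Pre_
    let maxFreqElements := (freqMap.items.filter (fun kv => kv.2 == maxFreq)).map (·.1)
    let highestCount :=
      if (maxFreqElements.length : Int) > 1 then (PySem.List.min? maxFreqElements (fun x => x)).getD 0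
      else (PySem.List.pyGet? maxFreqElements 0).getD 0
    let minFreq := (PySem.List.min? freqMap.values (fun x => x)).getD 0
    let minFreqElements := (freqMap.items.filter (fun kv => kv.2 == minFreq)).map (·.1)
    let lowestCount :=
      if (minFreqElements.length : Int) > 1 then (PySem.List.min? minFreqElements (fun x => x)).getD 0
      else (PySem.List.pyGet? minFreqElements 0).getD 0
    [highestCount, lowestCount]

-- ===== PORT B =====
-- one winner-update for the highest-frequency (break ties toward the smaller key)
def pvHiStep (a : Int × Int) (kv : Int × Int) : Int × Int :=
  if kv.2 > a.1 ∨ (kv.2 = a.1 ∧ kv.1 < a.2) then (kv.2, kv.1) else a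

-- one winner-update for the lowest-frequency
def pvLoStep (a : Int × Int) (kv : Int × Int) : Int × Int :=
  if kv.2 < a.1 ∨ (kv.2 = a.1 ∧ kv.1 < a.2) then (kv.2, kv.1) else a

def getFrequencies_alt (n : Int) (v : List Int) : List Int :=
  if v = [] then [0, 0]
  else
    let freq := (PySem.List.pyRange 0 n).foldl
      (fun d i =>
        let x := PySem.List.pyGetD v i 0      -- v[i]; in range under Pre_
        d.insert x (d.getD x 0 + 1)) (PySem.Dict.empty : PySem.Dict Int Int)   -- freq[x] = freq.get(x, 0) + 1
    match freq.items with
    | [] => [0, 0]   -- unreachable under Pre_ (items[0] raises IndexError in Python)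
    | (k0, c0) :: rest =>
      let r := rest.foldl (fun s kv => (pvHiStep s.1 kv, pvLoStep s.2 kv)) ((c0, k0), (c0, k0))
      [r.1.2, r.2.2]

-- ===== PRECONDITION & SPEC =====
-- Pre_ excludes exactly the inputs where A raises: nonempty v with n < 1 (empty range → max() on an
-- empty sequence, ValueError) or n > len(v) (v[i] IndexError).
def Pre_getFrequencies (n : Int) (v : List Int) : Prop :=
  v = [] ∨ (1 ≤ n ∧ n ≤ (v.length : Int))
instance (n : Int) (v : List Int) : Decidable (Pre_getFrequencies n v) := by unfold Pre_getFrequencies; infer_instance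
def pvWitness_getFrequencies : Int × List Int := (4, [2, -1, 2, 7])

def Spec_getFrequencies (n : Int) (v : List Int) (out : List Int) : Prop := out = getFrequencies_alt n v
instance (n : Int) (v : List Int) (out : List Int) : Decidable (Spec_getFrequencies n v out) := by unfold Spec_getFrequencies; infer_instance

-- ===== CLAIM (what is proved, stated in full; the proofs are below) =====
def Claim_equal_getFrequencies : Prop := ∀ (n : Int) (v : List Int), Dom_getFrequencies n v → Pre_getFrequencies n v → Spec_getFrequencies n v (getFrequencies n v)

-- ===== LEMMAS AND PROOFS =====

-- A's branching update is B's unconditional counting update.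
lemma stepA_eq_stepB (d : PySem.Dict Int Int) (x : Int) :
    (if d.contains x then d.insert x (d.getD x 0 + 1) else d.insert x 1)
      = d.insert x (d.getD x 0 + 1) := by
  by_cases h : d.contains x
  · simp [h]
  · have hn : d.get? x = none := by
      rw [PySem.Dict.get?_eq_none_iff_contains]
      simpa using h
    simp [h, PySem.Dict.getD, hn]

-- the winner-fold of B: its result is an entry of the list, its frequency component is maximal,
-- and its key component is minimal among the entries achieving that frequency.
lemma hiStep_spec (l : List (Int × Int)) : ∀ (c k : Int),
    ((l.foldl pvHiStep (c, k)).2, (l.foldl pvHiStep (c, k)).1) ∈ (k, c) :: l ∧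
    (∀ kv ∈ (k, c) :: l, kv.2 ≤ (l.foldl pvHiStep (c, k)).1) ∧
    (∀ kv ∈ (k, c) :: l, kv.2 = (l.foldl pvHiStep (c, k)).1 → (l.foldl pvHiStep (c, k)).2 ≤ kv.1) := by
  induction l with
  | nil => intro c k; simp
  | cons kv t ih =>
    intro c k
    by_cases h : kv.2 > c ∨ (kv.2 = c ∧ kv.1 < k)
    · have hstep : pvHiStep (c, k) kv = (kv.2, kv.1) := by simp [pvHiStep, h]
      obtain ⟨hmem, hmax, hmin⟩ := ih kv.2 kv.1
      simp only [List.foldl_cons, hstep]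
      refine ⟨?_, ?_, ?_⟩
      · rcases List.mem_cons.mp hmem with h' | h'
        · rw [h']; simp
        · exact List.mem_cons_of_mem _ (List.mem_cons_of_mem _ h')
      · intro p hp
        rcases List.mem_cons.mp hp with rfl | hp'
        · have hkv := hmax (kv.1, kv.2) (by simp)
          simp only at hkv ⊢
          omega
        · exact hmax p (by simpa using hp')
      · intro p hp hpv
        rcases List.mem_cons.mp hp with rfl | hp'
        · have hkv2 := hmax (kv.1, kv.2) (by simp)
          have hkv3 := hmin (kv.1, kv.2) (by simp)
          simp only at hkv2 hkv3 hpv ⊢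
          omega
        · exact hmin p (by simpa using hp') hpv
    · have hstep : pvHiStep (c, k) kv = (c, k) := by simp only [pvHiStep, if_neg h]
      obtain ⟨hmem, hmax, hmin⟩ := ih c k
      simp only [List.foldl_cons, hstep]
      refine ⟨?_, ?_, ?_⟩
      · rcases List.mem_cons.mp hmem with h' | h'
        · rw [h']; simp
        · exact List.mem_cons_of_mem _ (List.mem_cons_of_mem _ h')
      · intro p hp
        rcases List.mem_cons.mp hp with rfl | hp'
        · rcases List.mem_cons.mp hp with _ | _
          all_goals {
            have hc := hmax (k, c) (by simp)
            simp only at hc ⊢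
            omega }
        · rcases List.mem_cons.mp hp' with rfl | hp''
          · have hc := hmax (k, c) (by simp)
            simp only at hc ⊢
            omega
          · exact hmax p (by simp [hp''])
      · intro p hp hpv
        rcases List.mem_cons.mp hp with rfl | hp'
        · exact hmin _ (by simp) hpv
        · rcases List.mem_cons.mp hp' with rfl | hp''
          · have hc := hmax (k, c) (by simp)
            have hk := hmin (k, c) (by simp)
            simp only at hc hk hpv ⊢
            omega
          · exact hmin p (by simp [hp'']) hpv

lemma loStep_spec (l : List (Int × Int)) : ∀ (c k : Int),
    ((l.foldl pvLoStep (c, k)).2, (l.foldl pvLoStep (c, k)).1) ∈ (k, c) :: l ∧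
    (∀ kv ∈ (k, c) :: l, (l.foldl pvLoStep (c, k)).1 ≤ kv.2) ∧
    (∀ kv ∈ (k, c) :: l, kv.2 = (l.foldl pvLoStep (c, k)).1 → (l.foldl pvLoStep (c, k)).2 ≤ kv.1) := by
  induction l with
  | nil => intro c k; simp
  | cons kv t ih =>
    intro c k
    by_cases h : kv.2 < c ∨ (kv.2 = c ∧ kv.1 < k)
    · have hstep : pvLoStep (c, k) kv = (kv.2, kv.1) := by simp [pvLoStep, h]
      obtain ⟨hmem, hmax, hmin⟩ := ih kv.2 kv.1
      simp only [List.foldl_cons, hstep]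
      refine ⟨?_, ?_, ?_⟩
      · rcases List.mem_cons.mp hmem with h' | h'
        · rw [h']; simp
        · exact List.mem_cons_of_mem _ (List.mem_cons_of_mem _ h')
      · intro p hp
        rcases List.mem_cons.mp hp with rfl | hp'
        · have hkv := hmax (kv.1, kv.2) (by simp)
          simp only at hkv ⊢
          omega
        · exact hmax p (by simpa using hp')
      · intro p hp hpv
        rcases List.mem_cons.mp hp with rfl | hp'
        · have hkv2 := hmax (kv.1, kv.2) (by simp)
          have hkv3 := hmin (kv.1, kv.2) (by simp)
          simp only at hkv2 hkv3 hpv ⊢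
          omega
        · exact hmin p (by simpa using hp') hpv
    · have hstep : pvLoStep (c, k) kv = (c, k) := by simp only [pvLoStep, if_neg h]
      obtain ⟨hmem, hmax, hmin⟩ := ih c k
      simp only [List.foldl_cons, hstep]
      refine ⟨?_, ?_, ?_⟩
      · rcases List.mem_cons.mp hmem with h' | h'
        · rw [h']; simp
        · exact List.mem_cons_of_mem _ (List.mem_cons_of_mem _ h')
      · intro p hp
        rcases List.mem_cons.mp hp with rfl | hp'
        · have hc := hmax (k, c) (by simp)
          simp only at hc ⊢
          omega
        · rcases List.mem_cons.mp hp' with rfl | hp''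
          · have hc := hmax (k, c) (by simp)
            simp only at hc ⊢
            omega
          · exact hmax p (by simp [hp''])
      · intro p hp hpv
        rcases List.mem_cons.mp hp with rfl | hp'
        · exact hmin _ (by simp) hpv
        · rcases List.mem_cons.mp hp' with rfl | hp''
          · have hc := hmax (k, c) (by simp)
            have hk := hmin (k, c) (by simp)
            simp only at hc hk hpv ⊢
            omega
          · exact hmin p (by simp [hp'']) hpv

-- A's "max of values, filter, then min / first" selection equals B's highest winner key,
-- on an arbitrary nonempty items list (k0, c0) :: rest.
lemma selectA_hi (k0 c0 : Int) (rest : List (Int × Int)) :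
    (let items := (k0, c0) :: rest
     let maxFreq := (PySem.List.max? (items.map (·.2)) (fun x => x)).getD 0
     let els := (items.filter (fun kv => kv.2 == maxFreq)).map (·.1)
     if (els.length : Int) > 1 then (PySem.List.min? els (fun x => x)).getD 0
     else (PySem.List.pyGet? els 0).getD 0)
      = (rest.foldl pvHiStep (c0, k0)).2 := by
  obtain ⟨hmem, hmax, hmin⟩ := hiStep_spec rest c0 k0
  set r := rest.foldl pvHiStep (c0, k0) with hr
  -- the max of the values is r.1
  obtain ⟨m, hm⟩ : ∃ m, PySem.List.max? (((k0, c0) :: rest).map (·.2)) (fun x => x) = some m := by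
    cases hmx : PySem.List.max? (((k0, c0) :: rest).map (·.2)) (fun x => x) with
    | none => simp [PySem.List.max?_eq_none_iff] at hmx
    | some m => exact ⟨m, rfl⟩
  have hmval : m = r.1 := by
    have h1 : m ∈ ((k0, c0) :: rest).map (·.2) := PySem.List.max?_mem hm
    obtain ⟨p, hp, hp2⟩ := List.mem_map.mp h1
    have h2 := hmax p hp
    simp only at hp2 h2
    have h3 := PySem.List.max?_isMax hm r.1 (List.mem_map.mpr ⟨(r.2, r.1), hmem, rfl⟩)
    simp only at h3
    omega
  simp only [hm, Option.getD_some, hmval]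
  set els := ((((k0, c0) :: rest).filter (fun kv => kv.2 == r.1)).map (·.1)) with hels
  have hrel : r.2 ∈ els := by
    refine List.mem_map.mpr ⟨(r.2, r.1), ?_, rfl⟩
    exact List.mem_filter.mpr ⟨hmem, by simp⟩
  have hkey : ∀ x ∈ els, r.2 ≤ x := by
    intro x hx
    obtain ⟨p, hp, hpx⟩ := List.mem_map.mp hx
    have := List.mem_filter.mp hp
    exact hpx ▸ hmin p this.1 (by simpa using this.2)
  by_cases hlen : (els.length : Int) > 1
  · rw [if_pos hlen]
    obtain ⟨h, hh⟩ : ∃ h, PySem.List.min? els (fun x => x) = some h := by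
      cases hmx : PySem.List.min? els (fun x => x) with
      | none => rw [PySem.List.min?_eq_none_iff] at hmx; simp [hmx] at hrel
      | some h => exact ⟨h, rfl⟩
    have h1 : h ∈ els := PySem.List.min?_mem hh
    have h2 := PySem.List.min?_isMin hh r.2 hrel
    have h3 := hkey h h1
    rw [hh, Option.getD_some]
    simp only at h2
    omega
  · rw [if_neg hlen]
    have : els.length = 1 := by
      have : els ≠ [] := by intro h; simp [h] at hrel
      have := List.length_pos_of_ne_nil this
      omega
    obtain ⟨e, he⟩ := List.length_eq_one_iff.mp this
    rw [he] at hrel ⊢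
    simp only [List.mem_singleton] at hrel
    simp [PySem.List.pyGet?, PySem.List.pyIdx?, hrel]

lemma selectA_lo (k0 c0 : Int) (rest : List (Int × Int)) :
    (let items := (k0, c0) :: rest
     let minFreq := (PySem.List.min? (items.map (·.2)) (fun x => x)).getD 0
     let els := (items.filter (fun kv => kv.2 == minFreq)).map (·.1)
     if (els.length : Int) > 1 then (PySem.List.min? els (fun x => x)).getD 0
     else (PySem.List.pyGet? els 0).getD 0)
      = (rest.foldl pvLoStep (c0, k0)).2 := by
  obtain ⟨hmem, hmax, hmin⟩ := loStep_spec rest c0 k0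
  set r := rest.foldl pvLoStep (c0, k0) with hr
  obtain ⟨m, hm⟩ : ∃ m, PySem.List.min? (((k0, c0) :: rest).map (·.2)) (fun x => x) = some m := by
    cases hmx : PySem.List.min? (((k0, c0) :: rest).map (·.2)) (fun x => x) with
    | none => simp [PySem.List.min?_eq_none_iff] at hmx
    | some m => exact ⟨m, rfl⟩
  have hmval : m = r.1 := by
    have h1 : m ∈ ((k0, c0) :: rest).map (·.2) := PySem.List.min?_mem hm
    obtain ⟨p, hp, hp2⟩ := List.mem_map.mp h1
    have h2 := hmax p hp
    simp only at hp2 h2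
    have h3 := PySem.List.min?_isMin hm r.1 (List.mem_map_of_mem hmem)
    simp only at h3
    omega
  simp only [hm, Option.getD_some, hmval]
  set els := ((((k0, c0) :: rest).filter (fun kv => kv.2 == r.1)).map (·.1)) with hels
  have hrel : r.2 ∈ els := by
    refine List.mem_map.mpr ⟨(r.2, r.1), ?_, rfl⟩
    exact List.mem_filter.mpr ⟨hmem, by simp⟩
  have hkey : ∀ x ∈ els, r.2 ≤ x := by
    intro x hx
    obtain ⟨p, hp, hpx⟩ := List.mem_map.mp hx
    have := List.mem_filter.mp hp
    exact hpx ▸ hmin p this.1 (by simpa using this.2)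
  by_cases hlen : (els.length : Int) > 1
  · rw [if_pos hlen]
    obtain ⟨h, hh⟩ : ∃ h, PySem.List.min? els (fun x => x) = some h := by
      cases hmx : PySem.List.min? els (fun x => x) with
      | none => rw [PySem.List.min?_eq_none_iff] at hmx; simp [hmx] at hrel
      | some h => exact ⟨h, rfl⟩
    have h1 : h ∈ els := PySem.List.min?_mem hh
    have h2 := PySem.List.min?_isMin hh r.2 hrel
    have h3 := hkey h h1
    rw [hh, Option.getD_some]
    simp only at h2
    omega
  · rw [if_neg hlen]
    have : els.length = 1 := by
      have : els ≠ [] := by intro h; simp [h] at hrel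
      have := List.length_pos_of_ne_nil this
      omega
    obtain ⟨e, he⟩ := List.length_eq_one_iff.mp this
    rw [he] at hrel ⊢
    simp only [List.mem_singleton] at hrel
    simp [PySem.List.pyGet?, PySem.List.pyIdx?, hrel]

-- the two frequency dictionaries coincide: A's branching update is B's unconditional one
lemma dicts_eq (n : Int) (v : List Int) :
    (PySem.List.pyRange 0 n).foldl
      (fun d i =>
        let x := PySem.List.pyGetD v i 0
        if d.contains x then d.insert x (d.getD x 0 + 1) else d.insert x 1) (PySem.Dict.empty : PySem.Dict Int Int)
    = (PySem.List.pyRange 0 n).foldl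
        (fun d i =>
          let x := PySem.List.pyGetD v i 0
          d.insert x (d.getD x 0 + 1)) (PySem.Dict.empty : PySem.Dict Int Int) := by
  refine PySem.List.foldl_congr_mem _ _ _ _ ?_
  intro d i _
  exact stepA_eq_stepB d (PySem.List.pyGetD v i 0)

-- ===== VERDICT (by name: the statement is the Claim_ definition above) =====
theorem getFrequencies_spec : Claim_equal_getFrequencies := by
  intro n v _ hpre
  unfold Spec_getFrequencies getFrequencies getFrequencies_alt
  by_cases hv : v = []
  · simp [hv]
  · rcases hpre with rfl | ⟨h1, h2⟩
    · exact absurd rfl hv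
    rw [if_neg hv, if_neg hv]
    simp only [dicts_eq n v]
    set d := (PySem.List.pyRange 0 n).foldl
        (fun d i =>
          let x := PySem.List.pyGetD v i 0
          d.insert x (d.getD x 0 + 1)) (PySem.Dict.empty : PySem.Dict Int Int) with hd
    -- the dict is nonempty: its keys are the distinct v[i], i < n, and 1 ≤ n
    have hne : d.items ≠ [] := by
      have hkeys : d.keys = PySem.Set.update (PySem.Dict.empty : PySem.Dict Int Int).keys
          ((PySem.List.pyRange 0 n).map (fun i => PySem.List.pyGetD v i 0)) := by
        rw [hd]
        exact PySem.Dict.keys_foldl_insert_key _ (fun i => PySem.List.pyGetD v i 0)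
          (fun d i => d.getD (PySem.List.pyGetD v i 0) 0 + 1) _
      have hxmem : PySem.List.pyGetD v 0 0 ∈ d.keys := by
        rw [hkeys]
        simp [PySem.Set.mem_update, PySem.List.mem_pyRange_one]
        exact ⟨0, ⟨le_refl 0, by omega⟩, rfl⟩
      intro hitems
      rw [show d.keys = d.items.map (·.1) from rfl, hitems] at hxmem
      simp at hxmem
    obtain ⟨⟨k0, c0⟩, rest, hitems⟩ : ∃ (p : Int × Int) (rest : List (Int × Int)), d.items = p :: rest := by
      cases h : d.items with
      | nil => exact absurd h hne
      | cons p rest => exact ⟨p, rest, rfl⟩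
    simp only [hitems]
    rw [PySem.List.foldl_prod_mk pvHiStep pvLoStep rest (c0, k0) (c0, k0)]
    have hvals : d.values = ((k0, c0) :: rest).map (·.2) := by
      rw [show d.values = d.items.map (·.2) from rfl, hitems]
    rw [hvals]
    rw [← selectA_hi k0 c0 rest, ← selectA_lo k0 c0 rest]
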